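-- pv_equiv track=rewrite | github.com/IIng1/Hikari-Listener | src/core/get_calendar.py | building_columns
-- ===== SOURCE A (Python) =====
-- import math
--
-- def building_columns(cells):
--     weeks = math.ceil(len(cells) / 7)
--     columns = []
--     for w in range(weeks):
--         col = cells[w*7:(w+1)*7]
--         while len(col) < 7: col.append(None)
--         columns.append(col)
--     return columns
-- ===== SOURCE B (Python) =====
-- def building_columns(cells):
--     # Grouper idiom: consume one shared iterator in 7-wide chunks, padding each
--     # chunk arithmetically with None, instead of precomputing ceil(len/7) and
--     # slicing by index with a while-append padding loop.
--     it = iter(cells)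
--     columns = []
--     while True:
--         chunk = [x for _, x in zip(range(7), it)]
--         if not chunk:
--             return columns
--         columns.append(chunk + [None] * (7 - len(chunk)))
-- ===== Notes on version B (the rewrite author's own statement) =====
-- stated objective: idiomatic
-- what changed: B uses the grouper idiom, consuming one shared iterator in 7-wide chunks padded arithmetically with None, replacing A's ceil(len/7) week count, index-computed slices and while-append padding loop.
import Mathlib
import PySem

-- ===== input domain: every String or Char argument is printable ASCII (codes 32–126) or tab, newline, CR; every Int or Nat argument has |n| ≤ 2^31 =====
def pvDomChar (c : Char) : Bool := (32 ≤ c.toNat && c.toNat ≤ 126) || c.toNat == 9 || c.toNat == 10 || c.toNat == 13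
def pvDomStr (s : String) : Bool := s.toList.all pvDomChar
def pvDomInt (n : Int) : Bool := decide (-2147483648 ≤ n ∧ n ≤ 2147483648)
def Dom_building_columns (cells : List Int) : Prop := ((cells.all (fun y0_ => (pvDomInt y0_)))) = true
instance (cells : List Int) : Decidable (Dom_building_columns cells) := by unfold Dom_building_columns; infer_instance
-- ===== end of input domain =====

-- B consumes the list as one stream in 7-wide chunks padded with none (grouper idiom), instead of A's
-- ceil(len/7) week count with index-computed slices and a while-append padding loop (objective: idiomatic).

-- ===== PORT A =====
-- `while len(col) < 7: col.append(None)`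
def padCol (c : List (Option Int)) : List (Option Int) :=
  if c.length < 7 then padCol (c ++ [none]) else c
  termination_by 7 - c.length
  decreasing_by simp; omega

-- math.ceil(len(cells) / 7) = (len + 6) / 7 exactly, since len ≥ 0 and float division is exact here
def building_columns (cells : List Int) : List (List (Option Int)) :=
  let weeks := (cells.length + 6) / 7
  (List.range weeks).foldl
    (fun columns w =>
      columns ++ [padCol ((PySem.List.slice cells (some ((w * 7 : Nat) : Int)) (some ((w * 7 + 7 : Nat) : Int))).map some)])
    []

-- ===== PORT B =====
def altGo : List Int → List (List (Option Int))
  | [] => []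
  | x :: xs =>
    (((x :: xs).take 7).map some ++ List.replicate (7 - ((x :: xs).take 7).length) (none : Option Int))
      :: altGo ((x :: xs).drop 7)
  termination_by l => l.length
  decreasing_by simp

def building_columns_alt (cells : List Int) : List (List (Option Int)) := altGo cells

-- ===== PRECONDITION & SPEC =====
def Spec_building_columns (cells : List Int) (out : List (List (Option Int))) : Prop := out = building_columns_alt cells
instance (cells : List Int) (out : List (List (Option Int))) : Decidable (Spec_building_columns cells out) := by unfold Spec_building_columns; infer_instance

-- ===== CLAIM (what is proved, stated in full; the proofs are below) =====
def Claim_equal_building_columns : Prop := ∀ (cells : List Int), Dom_building_columns cells → Spec_building_columns cells (building_columns cells)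

-- ===== LEMMAS AND PROOFS =====

theorem padCol_eq (c : List (Option Int)) :
    padCol c = c ++ List.replicate (7 - c.length) none := by
  fun_induction padCol c with
  | case1 c h ih =>
    rw [ih]
    have h1 : 7 - c.length = (7 - (c ++ [none]).length) + 1 := by simp; omega
    rw [h1, List.replicate_succ]
    simp
  | case2 c h =>
    have : 7 - c.length = 0 := by omega
    simp [this]

theorem chunk_map (cells : List Int) :
    (List.range ((cells.length + 6) / 7)).map
      (fun w => ((cells.drop (w * 7)).take 7).map some
        ++ List.replicate (7 - ((cells.drop (w * 7)).take 7).length) (none : Option Int))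
      = altGo cells := by
  fun_induction altGo cells with
  | case1 => simp
  | case2 x xs ih =>
    have hlen : ((x :: xs).length + 6) / 7 = (((x :: xs).drop 7).length + 6) / 7 + 1 := by
      simp; omega
    rw [hlen, List.range_succ_eq_map, List.map_cons, List.map_map]
    refine List.cons_eq_cons.mpr ⟨by simp, ?_⟩
    rw [← ih]
    apply List.map_congr_left
    intro w _
    have hd : (x :: xs).drop ((w + 1) * 7) = ((x :: xs).drop 7).drop (w * 7) := by
      rw [List.drop_drop]; ring_nf
    simp only [Function.comp, Nat.succ_eq_add_one]
    rw [hd]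

theorem building_columns_eq (cells : List Int) :
    building_columns cells = building_columns_alt cells := by
  unfold building_columns building_columns_alt
  rw [PySem.List.foldl_append_singleton_eq_map]
  rw [← chunk_map cells]
  apply List.map_congr_left
  intro w _
  rw [padCol_eq]
  have hs : PySem.List.slice cells (some ((w * 7 : Nat) : Int)) (some ((w * 7 + 7 : Nat) : Int))
      = (cells.drop (w * 7)).take 7 := by
    rw [PySem.List.slice_natCast]
    congr 1
    omega
  rw [hs]
  simp

-- ===== VERDICT (by name: the statement is the Claim_ definition above) =====
theorem building_columns_spec : Claim_equal_building_columns := by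
  intro cells _
  exact building_columns_eq cells
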